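-- pv_equiv track=rewrite | github.com/BlueSinkers/codepath-tip102 | Week 3/Pset B/problem2.py | process_performance_requests
-- ===== SOURCE A (Python) =====
-- import heapq
--
-- def process_performance_requests(requests):
--     pq = []
--
--     # Push all requests into a max-heap (use negative priority for max-heap)
--     for priority, performance in requests:
--         heapq.heappush(pq, (-priority, performance))
--
--     result = []
--     while pq:
--         _, performance = heapq.heappop(pq)
--         result.append(performance)
--
--     return result
-- ===== SOURCE B (Python) =====
-- def process_performance_requests(requests):
--     ordered = sorted(requests, key=lambda r: (-r[0], r[1]))
--     return [performance for _, performance in ordered]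
-- ===== Notes on version B (the rewrite author's own statement) =====
-- stated objective: simpler
-- what changed: Replaces the explicit heap (push loop building a max-heap, then a drain loop of heappops) with a single stable sort by key (-priority, performance) followed by one projection pass.
import Mathlib
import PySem

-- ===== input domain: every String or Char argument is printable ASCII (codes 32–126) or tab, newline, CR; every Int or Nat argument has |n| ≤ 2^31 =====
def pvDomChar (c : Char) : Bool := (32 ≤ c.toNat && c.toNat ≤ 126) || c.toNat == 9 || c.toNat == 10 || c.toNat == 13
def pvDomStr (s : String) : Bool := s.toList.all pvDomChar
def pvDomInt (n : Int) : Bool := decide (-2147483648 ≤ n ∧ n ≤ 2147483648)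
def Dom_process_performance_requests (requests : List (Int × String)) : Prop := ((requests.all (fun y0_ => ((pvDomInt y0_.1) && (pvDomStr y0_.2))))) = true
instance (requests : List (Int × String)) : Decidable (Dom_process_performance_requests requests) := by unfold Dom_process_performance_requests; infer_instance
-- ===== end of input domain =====

-- B replaces A's explicit heap (a push loop building a max-heap, then a drain loop of
-- heappops) with one stable sort by the key (-priority, performance) plus a projection
-- pass; objective: simpler.

-- ===== PORT A =====
-- heapq is ported by its contract (there is no heap in PySem/Mathlib): heappush adds the
-- element to the pool; heappop removes and returns the smallest element under Python's
-- tuple order (lexicographic; exact here: elements tied under the full tuple are equal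
-- tuples, so the popped sequence is exactly CPython's).
def pyHeapPush (pq : List (Int × String)) (x : Int × String) : List (Int × String) :=
  pq ++ [x]

-- the 'while pq:' drain loop: pop the smallest tuple, append its performance to result
def pvDrain (pq : List (Int × String)) (result : List String) : List String :=
  match h : PySem.List.min? pq (fun x => toLex x) with
  | none => result
  | some m => pvDrain (pq.erase m) (result ++ [m.2])
termination_by pq.length
decreasing_by
  have hm : m ∈ pq := PySem.List.min?_mem h
  have := List.length_erase_of_mem hm
  have : 0 < pq.length := List.length_pos_of_mem hm
  simp [List.length_erase_of_mem hm]
  omega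

def process_performance_requests (requests : List (Int × String)) : List String :=
  let pq := requests.foldl (fun pq r => pyHeapPush pq (-r.1, r.2)) []
  pvDrain pq []

-- ===== PORT B =====
def process_performance_requests_alt (requests : List (Int × String)) : List String :=
  let ordered := PySem.List.sorted requests (fun r => toLex ((-r.1, r.2) : Int × String)) false
  ordered.map (fun r => r.2)

-- ===== PRECONDITION & SPEC =====
def Spec_process_performance_requests (requests : List (Int × String)) (out : List String) : Prop := out = process_performance_requests_alt requests
instance (requests : List (Int × String)) (out : List String) : Decidable (Spec_process_performance_requests requests out) := by unfold Spec_process_performance_requests; infer_instance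

-- ===== CLAIM (what is proved, stated in full; the proofs are below) =====
def Claim_equal_process_performance_requests : Prop := ∀ (requests : List (Int × String)), Dom_process_performance_requests requests → Spec_process_performance_requests requests (process_performance_requests requests)

-- ===== LEMMAS AND PROOFS =====

-- the push loop just collects the negated-priority tuples in order
theorem foldl_push_eq_map (requests : List (Int × String)) (init : List (Int × String)) :
    requests.foldl (fun pq r => pyHeapPush pq (-r.1, r.2)) init
      = init ++ requests.map (fun r => ((-r.1, r.2) : Int × String)) := by
  induction requests generalizing init with
  | nil => simp
  | cons x t ih =>
    rw [List.foldl_cons, ih]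
    simp [pyHeapPush]

-- removing the first minimal element from the front of the sorted list
theorem sorted_cons_min (pq : List (Int × String)) (m : Int × String)
    (h : PySem.List.min? pq (fun x => toLex x) = some m) :
    PySem.List.sorted pq (fun x => toLex x) false
      = m :: PySem.List.sorted (pq.erase m) (fun x => toLex x) false := by
  haveI : Std.Antisymm (fun a b : Int × String => (toLex a : Lex (Int × String)) ≤ toLex b) :=
    ⟨fun a b hab hba => toLex.injective (le_antisymm hab hba)⟩
  have hm : m ∈ pq := PySem.List.min?_mem h
  have hperm : (m :: PySem.List.sorted (pq.erase m) (fun x => toLex x) false).Perm pq :=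
    (List.Perm.cons m (PySem.List.sorted_perm _ _ _)).trans (List.perm_cons_erase hm).symm
  refine List.Perm.eq_of_pairwise' (r := fun a b => (toLex a : Lex (Int × String)) ≤ toLex b)
    ?_ ?_ ((PySem.List.sorted_perm _ _ _).trans hperm.symm)
  · exact PySem.List.sorted_pairwise pq (fun x => toLex x)
  · refine List.Pairwise.cons ?_ (PySem.List.sorted_pairwise _ _)
    intro b hb
    have hb' : b ∈ pq := List.mem_of_mem_erase ((PySem.List.mem_sorted _ _ _ _).1 hb)
    exact PySem.List.min?_isMin h b hb'

-- the drain loop emits the performances of the sorted tuple pool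
theorem pvDrain_eq_sorted (n : Nat) (pq : List (Int × String)) (acc : List String)
    (hn : pq.length ≤ n) :
    pvDrain pq acc = acc ++ (PySem.List.sorted pq (fun x => toLex x) false).map (fun r => r.2) := by
  induction n generalizing pq acc with
  | zero =>
    have hpq : pq = [] := List.eq_nil_of_length_eq_zero (Nat.le_zero.1 hn)
    subst hpq
    rw [pvDrain]
    split
    · rw [(PySem.List.sorted_eq_nil_iff (xs := []) (key := fun x : Int × String => toLex x) (rev := false)).mpr rfl]
      simp
    · rename_i m h
      rw [(PySem.List.min?_eq_none_iff ([] : List (Int × String)) (fun x => toLex x)).2 rfl] at h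
      cases h
  | succ k ih =>
    rw [pvDrain]
    split
    · rename_i h
      have hpq : pq = [] := (PySem.List.min?_eq_none_iff _ _).1 h
      subst hpq
      rw [(PySem.List.sorted_eq_nil_iff (xs := []) (key := fun x : Int × String => toLex x) (rev := false)).mpr rfl]
      simp
    · rename_i m h
      have hm : m ∈ pq := PySem.List.min?_mem h
      have hlen : (pq.erase m).length ≤ k := by
        have := List.length_erase_of_mem hm
        have := List.length_pos_of_mem hm
        omega
      rw [ih _ _ hlen, sorted_cons_min pq m h]
      simp

theorem insertBy_map (p : (Int × String) → (Int × String) → Bool)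
    (f : (Int × String) → (Int × String)) (x : Int × String) (ys : List (Int × String)) :
    PySem.List.insertBy p (f x) (ys.map f)
      = (PySem.List.insertBy (fun a b => p (f a) (f b)) x ys).map f := by
  induction ys with
  | nil => simp [PySem.List.insertBy]
  | cons y t ih =>
    simp only [List.map_cons, PySem.List.insertBy]
    by_cases hp : p (f x) (f y)
    · simp [hp]
    · simp [hp, ih]

-- sorting the mapped list is mapping the list sorted under the composed key
theorem sorted_map_comm (xs : List (Int × String)) :
    PySem.List.sorted (xs.map (fun r => ((-r.1, r.2) : Int × String))) (fun x => toLex x) false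
      = (PySem.List.sorted xs (fun r => toLex ((-r.1, r.2) : Int × String)) false).map
          (fun r => ((-r.1, r.2) : Int × String)) := by
  rw [PySem.List.sorted_eq_foldl_insertBy, PySem.List.sorted_eq_foldl_insertBy]
  have key : ∀ (xs : List (Int × String)) (acc : List (Int × String)),
      (xs.map (fun r => ((-r.1, r.2) : Int × String))).foldl
          (fun acc x => PySem.List.insertBy
            (fun a b => decide ((toLex a : Lex (Int × String)) < toLex b)) x acc)
          (acc.map (fun r => ((-r.1, r.2) : Int × String)))
        = (xs.foldl (fun acc x => PySem.List.insertBy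
            (fun a b => decide ((toLex ((-a.1, a.2) : Int × String) : Lex (Int × String))
              < toLex ((-b.1, b.2) : Int × String))) x acc) acc).map
            (fun r => ((-r.1, r.2) : Int × String)) := by
    intro xs
    induction xs with
    | nil => intro acc; simp
    | cons x t ih =>
      intro acc
      simp only [List.map_cons, List.foldl_cons]
      rw [insertBy_map (fun a b => decide ((toLex a : Lex (Int × String)) < toLex b))
        (fun r => ((-r.1, r.2) : Int × String)) x acc]
      exact ih _
  simpa using key xs []

-- ===== VERDICT (by name: the statement is the Claim_ definition above) =====
theorem process_performance_requests_spec : Claim_equal_process_performance_requests := by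
  intro requests _
  unfold Spec_process_performance_requests process_performance_requests process_performance_requests_alt
  rw [foldl_push_eq_map, List.nil_append,
    pvDrain_eq_sorted (requests.map (fun r => ((-r.1, r.2) : Int × String))).length _ [] (le_refl _),
    List.nil_append, sorted_map_comm]
  simp
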